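-- pv_equiv track=rewrite | github.com/tidorino/SoftUni-Fundamentals | text_processing_exercise/02_character_multiplier.py | sum_func
-- ===== SOURCE A (Python) =====
-- def sum_func(str1, str2):
--     total_sum = 0
--
--     for i in range(len(str1)):
--         if i < len(str2):
--             total_sum += ord(str1[i]) * ord(str2[i])
--         else:
--             total_sum += ord(str1[i])
--
--     return total_sum
-- ===== SOURCE B (Python) =====
-- def sum_func(str1, str2):
--     # Every char of str1 contributes its code once; each char paired with str2
--     # contributes an extra ord(a)*(ord(b)-1), since ord(a)*ord(b) = ord(a) + ord(a)*(ord(b)-1).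
--     base = sum(map(ord, str1))
--     correction = sum(ord(a) * (ord(b) - 1) for a, b in zip(str1, str2))
--     return base + correction
-- ===== Notes on version B (the rewrite author's own statement) =====
-- stated objective: alternative
-- what changed: Replaces the indexed loop with its per-index length test by an algebraic identity: a base sum of all char codes of str1 plus a correction term ord(a)*(ord(b)-1) over the zipped prefix, using ord(a)*ord(b) = ord(a) + ord(a)*(ord(b)-1).
import Mathlib
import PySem

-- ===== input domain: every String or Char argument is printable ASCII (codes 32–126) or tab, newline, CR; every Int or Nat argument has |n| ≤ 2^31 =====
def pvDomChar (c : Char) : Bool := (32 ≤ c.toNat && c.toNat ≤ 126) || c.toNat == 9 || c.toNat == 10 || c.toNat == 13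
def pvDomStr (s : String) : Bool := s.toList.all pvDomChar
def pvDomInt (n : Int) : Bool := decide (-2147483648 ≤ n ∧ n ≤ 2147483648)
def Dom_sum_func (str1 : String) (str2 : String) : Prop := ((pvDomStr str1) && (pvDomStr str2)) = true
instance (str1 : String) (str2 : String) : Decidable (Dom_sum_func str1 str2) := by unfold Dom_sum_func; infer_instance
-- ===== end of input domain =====

-- B replaces A's indexed loop with its per-index length test by an algebraic identity:
-- a base sum of all char codes of str1 plus a correction ord(a)*(ord(b)-1) over the
-- zipped prefix (ord(a)*ord(b) = ord(a) + ord(a)*(ord(b)-1)); objective: alternative.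

-- ===== PORT A =====
def sum_func (str1 : String) (str2 : String) : Int :=
  let l1 := str1.toList
  let l2 := str2.toList
  (PySem.List.pyRange 0 (l1.length : Int) 1).foldl
    (fun total_sum i =>
      if i < (l2.length : Int) then
        total_sum + (PySem.List.pyGetD l1 i ' ').toNat * (PySem.List.pyGetD l2 i ' ').toNat
      else
        total_sum + (PySem.List.pyGetD l1 i ' ').toNat)
    0

-- ===== PORT B =====
def sum_func_alt (str1 : String) (str2 : String) : Int :=
  let base : Int := (str1.toList.map (fun c => (c.toNat : Int))).sum
  let correction : Int :=
    ((str1.toList.zip str2.toList).map (fun ab => (ab.1.toNat : Int) * ((ab.2.toNat : Int) - 1))).sum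
  base + correction

-- ===== PRECONDITION & SPEC =====
def Spec_sum_func (str1 : String) (str2 : String) (out : Int) : Prop := out = sum_func_alt str1 str2
instance (str1 : String) (str2 : String) (out : Int) : Decidable (Spec_sum_func str1 str2 out) := by unfold Spec_sum_func; infer_instance

-- ===== CLAIM (what is proved, stated in full; the proofs are below) =====
def Claim_equal_sum_func : Prop := ∀ (str1 : String) (str2 : String), Dom_sum_func str1 str2 → Spec_sum_func str1 str2 (sum_func str1 str2)

-- ===== LEMMAS AND PROOFS =====

-- The per-index sum over range(len l1), with A's branch, equals B's base + correction.
theorem pv_main (l1 l2 : List Char) :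
    ((List.range l1.length).map
       (fun k : Nat => if (k : Int) < (l2.length : Int)
                 then ((l1.getD k ' ').toNat : Int) * ((l2.getD k ' ').toNat : Int)
                 else ((l1.getD k ' ').toNat : Int))).sum
    = (l1.map (fun c => (c.toNat : Int))).sum
      + ((l1.zip l2).map (fun ab => (ab.1.toNat : Int) * ((ab.2.toNat : Int) - 1))).sum := by
  induction l1 generalizing l2 with
  | nil => simp
  | cons c l1 ih =>
    rw [List.length_cons, List.range_succ_eq_map, List.map_cons, List.map_map, List.sum_cons]
    cases l2 with
    | nil =>
      have hfalse : ∀ k : Nat, ¬ ((k : Int) < (0 : Int)) := fun k => by omega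
      have h := ih ([] : List Char)
      simp only [List.length_nil, Nat.cast_zero, hfalse, if_false, List.zip_nil_right,
        List.map_nil, List.sum_nil, add_zero] at h
      simp only [List.length_nil, Nat.cast_zero, Function.comp_def, List.getD_cons_succ,
        List.getD_cons_zero, hfalse, if_false, List.zip_nil_right, List.map_nil,
        List.sum_nil, add_zero, List.map_cons, List.sum_cons]
      rw [h, if_neg (by omega : ¬ ((0 : Int) < 0))]
    | cons b l2 =>
      have h := ih l2
      simp only [Function.comp_def, List.getD_cons_succ, List.getD_cons_zero,
        List.length_cons, List.zip_cons_cons, List.map_cons, List.sum_cons]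
      rw [if_pos (by omega)]
      rw [show (fun k : Nat => if ((k+1 : Nat) : Int) < ((l2.length + 1 : Nat) : Int)
              then ((l1.getD k ' ').toNat : Int) * ((l2.getD k ' ').toNat : Int)
              else ((l1.getD k ' ').toNat : Int)) =
            (fun k : Nat => if (k : Int) < (l2.length : Int)
              then ((l1.getD k ' ').toNat : Int) * ((l2.getD k ' ').toNat : Int)
              else ((l1.getD k ' ').toNat : Int)) from by
          funext k; congr 1; simp only [eq_iff_iff]; push_cast; omega]
      rw [h]; ring

-- ===== VERDICT (by name: the statement is the Claim_ definition above) =====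
theorem sum_func_spec : Claim_equal_sum_func := by
  intro str1 str2 _
  unfold Spec_sum_func sum_func sum_func_alt
  dsimp only
  rw [show (fun (total_sum : Int) (i : Int) =>
        if i < (str2.toList.length : Int) then
          total_sum + (PySem.List.pyGetD str1.toList i ' ').toNat * (PySem.List.pyGetD str2.toList i ' ').toNat
        else
          total_sum + (PySem.List.pyGetD str1.toList i ' ').toNat) =
      (fun (total_sum : Int) (i : Int) => total_sum +
        (if i < (str2.toList.length : Int) then
          ((PySem.List.pyGetD str1.toList i ' ').toNat : Int) * (PySem.List.pyGetD str2.toList i ' ').toNat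
        else
          ((PySem.List.pyGetD str1.toList i ' ').toNat : Int))) from by
    funext a i; split <;> rfl]
  rw [PySem.List.foldl_add, PySem.List.pyRange_zero_nat, List.map_map]
  simp only [Function.comp_def, PySem.List.pyGetD_natCast]
  rw [zero_add]
  exact pv_main str1.toList str2.toList
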